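-- pv_equiv track=rewrite | github.com/IDIASLab/IFC2F | IFC2F.py | find_ancestors
-- ===== SOURCE A (Python) =====
-- def find_ancestors(f_ordering,graph):
--     # find ancestors in the graph
--     K_new = len(f_ordering)
--     ancestors =  [[] for _ in range(K_new-1)]
--
--     for x in range(K_new-1):
--         child = f_ordering[x+1]
--         ancestors[x].append(child)
--         while True:
--             if graph[child] ==-1:
--                 break
--             ancestors[x].append(graph[child])
--             child = graph[child]
--     return ancestors
-- ===== SOURCE B (Python) =====
-- def find_ancestors(f_ordering, graph):
--     # memoized ancestor chains: walk parent pointers, stopping early at a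
--     # node whose full chain is already known
--     memo = {}
--     ancestors = []
--     for x in range(len(f_ordering) - 1):
--         node = f_ordering[x + 1]
--         prefix = []
--         cur = node
--         while cur not in memo and graph[cur] != -1:
--             prefix.append(cur)
--             cur = graph[cur]
--         chain = prefix + memo[cur] if cur in memo else prefix + [cur]
--         memo[node] = chain
--         ancestors.append(list(chain))
--     return ancestors
-- ===== Notes on version B (the rewrite author's own statement) =====
-- stated objective: alternative
-- what changed: B replaces A's per-row full walk to the root with a memo dict mapping node to its complete ancestor chain, walking parent pointers only until it hits an already-memoized node and splicing prefix + memo[stop]; output rows are fresh copies. Pre_ restricts to the natural domain of parent arrays pointing strictly downward (graph[i] in {-1} or [0,i)) with f_ordering[1:] valid indices: outside it A may raise IndexError, loop forever, or rely on negative-index wraparound; this closed-form termination condition also excludes some terminating inputs on which both programs still agree (see cites).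
-- outside the precondition, e.g. on find_ancestors([0, -1], [-1]): A returns [[-1]], B returns [[-1]]; on find_ancestors([9, 0], [1, -1]): A returns [[0, 1]], B returns [[0, 1]]
import Mathlib
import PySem

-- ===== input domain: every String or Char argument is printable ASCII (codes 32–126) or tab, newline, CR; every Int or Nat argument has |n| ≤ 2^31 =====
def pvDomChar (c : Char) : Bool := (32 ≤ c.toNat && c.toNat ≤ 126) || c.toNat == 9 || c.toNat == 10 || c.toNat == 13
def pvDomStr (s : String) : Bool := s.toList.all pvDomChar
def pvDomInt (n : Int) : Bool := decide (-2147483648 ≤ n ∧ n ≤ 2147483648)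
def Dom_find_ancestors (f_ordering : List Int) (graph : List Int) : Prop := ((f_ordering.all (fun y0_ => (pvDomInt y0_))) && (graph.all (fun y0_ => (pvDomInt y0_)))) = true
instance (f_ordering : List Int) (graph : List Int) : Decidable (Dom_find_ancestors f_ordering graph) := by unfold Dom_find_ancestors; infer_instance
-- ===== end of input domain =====

-- B replaces A's per-row full root walk with a memo table of complete ancestor chains,
-- stopping each walk at the first already-memoized node (alternative decomposition, same cost).

-- ===== PORT A =====
-- the 'while True' loop of A; fuel only makes it total (under Pre_ the walk strictly descends,
-- so graph.length + 1 fuel is never exhausted)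
def walkA (graph : List Int) : Int → Nat → List Int
  | _, 0 => []
  | child, fuel+1 =>
    match PySem.List.pyGet? graph child with
    | none => []          -- IndexError in Python; excluded by Pre_
    | some p => if p = -1 then [] else p :: walkA graph p fuel

def find_ancestors (f_ordering : List Int) (graph : List Int) : List (List Int) :=
  (PySem.List.pyRange 0 ((f_ordering.length : Int) - 1) 1).foldl
    (fun ancestors x =>
      match PySem.List.pyGet? f_ordering (x + 1) with
      | none => ancestors      -- IndexError; unreachable for x in the range
      | some child => ancestors ++ [child :: walkA graph child (graph.length + 1)]) []

-- ===== PORT B =====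
-- B's inner 'while cur not in memo and graph[cur] != -1' loop: returns (prefix, final cur)
def walkB (graph : List Int) (memo : PySem.Dict Int (List Int)) : Int → Nat → List Int × Int
  | cur, 0 => ([], cur)
  | cur, fuel+1 =>
    if memo.contains cur then ([], cur)
    else
      match PySem.List.pyGet? graph cur with
      | none => ([], cur)      -- IndexError in Python; excluded by Pre_
      | some p =>
        if p = -1 then ([], cur)
        else
          let r := walkB graph memo p fuel
          (cur :: r.1, r.2)

def find_ancestors_alt (f_ordering : List Int) (graph : List Int) : List (List Int) :=
  ((PySem.List.pyRange 0 ((f_ordering.length : Int) - 1) 1).foldl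
    (fun (st : PySem.Dict Int (List Int) × List (List Int)) x =>
      match PySem.List.pyGet? f_ordering (x + 1) with
      | none => st
      | some node =>
        let r := walkB graph st.1 node (graph.length + 1)
        let chain := match st.1.get? r.2 with
          | some c => r.1 ++ c
          | none => r.1 ++ [r.2]
        (st.1.insert node chain, st.2 ++ [chain]))
    (PySem.Dict.empty, [])).2

-- ===== PRECONDITION & SPEC =====
-- Pre_: whenever f_ordering has at least two entries (otherwise the loop body never runs and
-- both programs return []), the parent array must point strictly downward (graph[i] ∈ {-1} ∪ [0,i))
-- and f_ordering[1:] must hold valid indices: outside it A may raise IndexError, loop forever,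
-- or rely on negative-index wraparound; this closed-form termination condition also excludes
-- some terminating inputs on which both programs agree.
def Pre_find_ancestors (f_ordering : List Int) (graph : List Int) : Prop :=
  2 ≤ f_ordering.length →
    ((∀ v ∈ f_ordering.drop 1, 0 ≤ v ∧ v < (graph.length : Int)) ∧
     (∀ p ∈ PySem.List.enumerate graph 0, p.2 = -1 ∨ (0 ≤ p.2 ∧ p.2 < p.1)))
instance (f_ordering : List Int) (graph : List Int) : Decidable (Pre_find_ancestors f_ordering graph) := by
  unfold Pre_find_ancestors; infer_instance

def pvWitness_find_ancestors : List Int × List Int := ([0, 1, 2], [-1, 0, 1])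

def Spec_find_ancestors (f_ordering : List Int) (graph : List Int) (out : List (List Int)) : Prop := out = find_ancestors_alt f_ordering graph
instance (f_ordering : List Int) (graph : List Int) (out : List (List Int)) : Decidable (Spec_find_ancestors f_ordering graph out) := by unfold Spec_find_ancestors; infer_instance

-- ===== CLAIM (what is proved, stated in full; the proofs are below) =====
def Claim_equal_find_ancestors : Prop := ∀ (f_ordering : List Int) (graph : List Int), Dom_find_ancestors f_ordering graph → Pre_find_ancestors f_ordering graph → Spec_find_ancestors f_ordering graph (find_ancestors f_ordering graph)

-- ===== LEMMAS AND PROOFS =====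

-- shorthand for Pre_'s second conjunct
def GoodGraph (graph : List Int) : Prop :=
  ∀ p ∈ PySem.List.enumerate graph 0, p.2 = -1 ∨ (0 ≤ p.2 ∧ p.2 < p.1)

lemma mem_enumerate_of_getElem (xs : List Int) :
    ∀ (s : Int) (i : Nat), (h : i < xs.length) → ((s + i : Int), xs[i]) ∈ PySem.List.enumerate xs s := by
  induction xs with
  | nil => intro s i h; simp at h
  | cons a t ih =>
    intro s i h
    rw [PySem.List.enumerate_cons]
    cases i with
    | zero => simp
    | succ j =>
      right
      have := ih (s + 1) j (by simpa using h)
      simpa [add_assoc, add_comm, add_left_comm] using this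

lemma pyGet?_of_bounds (xs : List Int) (i : Int) (h0 : 0 ≤ i) (h1 : i < (xs.length : Int)) :
    PySem.List.pyGet? xs i = some (xs[i.toNat]'(by omega)) := by
  obtain ⟨n, rfl⟩ : ∃ n : Nat, i = (n : Int) := ⟨i.toNat, by omega⟩
  rw [PySem.List.pyGet?_natCast]
  simp only [Int.toNat_natCast]
  exact List.getElem?_eq_getElem (by omega)

-- under GoodGraph, the parent of an in-range node is -1 or a strictly smaller in-range node
lemma parent_step (graph : List Int) (hg : GoodGraph graph) (cur : Int)
    (h0 : 0 ≤ cur) (h1 : cur < (graph.length : Int)) :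
    graph[cur.toNat]'(by omega) = -1 ∨
      (0 ≤ graph[cur.toNat]'(by omega) ∧ graph[cur.toNat]'(by omega) < cur) := by
  have hm := mem_enumerate_of_getElem graph 0 cur.toNat (by omega)
  have := hg _ hm
  simpa [Int.toNat_of_nonneg h0] using this

-- walkA is fuel-insensitive above cur.toNat
lemma walkA_fuel (graph : List Int) (hg : GoodGraph graph) :
    ∀ (n : Nat) (cur : Int), 0 ≤ cur → cur < (graph.length : Int) → cur.toNat < n →
      ∀ f, n ≤ f → walkA graph cur f = walkA graph cur n := by
  intro n
  induction n with
  | zero => intro cur _ _ h; omega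
  | succ n' ih =>
    intro cur h0 h1 hn f hf
    obtain ⟨f', rfl⟩ : ∃ f', f = f' + 1 := ⟨f - 1, by omega⟩
    rw [walkA, walkA, pyGet?_of_bounds graph cur h0 h1]
    rcases parent_step graph hg cur h0 h1 with hp | ⟨hp0, hp1⟩
    · simp [hp]
    · set p := graph[cur.toNat]'(by omega) with hpdef
      have hne : ¬ p = -1 := by omega
      simp only [if_neg hne]
      have hlt : p.toNat < n' := by omega
      rw [ih p hp0 (by omega) hlt f' (by omega)]

-- the canonical chain A computes from a node
def chainOf (graph : List Int) (node : Int) : List Int :=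
  node :: walkA graph node (graph.length + 1)

-- memo invariant: every memoized entry is the canonical chain of an in-range node
def MemoInv (graph : List Int) (memo : PySem.Dict Int (List Int)) : Prop :=
  ∀ k v, memo.get? k = some v → 0 ≤ k ∧ k < (graph.length : Int) ∧ v = chainOf graph k

lemma memoInv_empty (graph : List Int) : MemoInv graph PySem.Dict.empty := by
  intro k v h
  rw [PySem.Dict.get?_empty] at h
  exact absurd h (by simp)

-- B's walk plus the final splice computes exactly A's chain
lemma walkB_combine (graph : List Int) (hg : GoodGraph graph)
    (memo : PySem.Dict Int (List Int)) (hm : MemoInv graph memo) :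
    ∀ (n : Nat) (cur : Int), 0 ≤ cur → cur < (graph.length : Int) → cur.toNat < n →
      ∀ f, n ≤ f →
      (match memo.get? (walkB graph memo cur f).2 with
       | some c => (walkB graph memo cur f).1 ++ c
       | none => (walkB graph memo cur f).1 ++ [(walkB graph memo cur f).2]) = chainOf graph cur := by
  intro n
  induction n with
  | zero => intro cur _ _ h; omega
  | succ n' ih =>
    intro cur h0 h1 hn f hf
    obtain ⟨f', rfl⟩ : ∃ f', f = f' + 1 := ⟨f - 1, by omega⟩
    rw [walkB]
    by_cases hc : memo.contains cur = true
    · -- memo hit: the stored chain is the canonical one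
      simp only [hc, if_true]
      have : (memo.get? cur).isSome := by
        rw [← PySem.Dict.contains_eq_isSome_get?]; exact hc
      obtain ⟨v, hv⟩ := Option.isSome_iff_exists.mp this
      obtain ⟨_, _, hvc⟩ := hm cur v hv
      simp [hv, hvc]
    · have hc' : memo.contains cur = false := by simpa using hc
      have hget : memo.get? cur = none := by
        cases hmg : memo.get? cur with
        | none => rfl
        | some v =>
          exfalso; apply hc
          rw [PySem.Dict.contains_eq_isSome_get?, hmg]; rfl
      simp only [hc', Bool.false_eq_true, if_false]
      rw [pyGet?_of_bounds graph cur h0 h1]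
      rcases parent_step graph hg cur h0 h1 with hp | ⟨hp0, hp1⟩
      · -- root: graph[cur] = -1
        simp only [hp, if_pos]
        rw [chainOf, walkA, pyGet?_of_bounds graph cur h0 h1]
        simp [hp, hget]
      · set p := graph[cur.toNat]'(by omega) with hpdef
        have hne : ¬ p = -1 := by omega
        simp only [if_neg hne]
        have hrec := ih p hp0 (by omega) (by omega) f' (by omega)
        have hfuel : walkA graph p graph.length = walkA graph p (graph.length + 1) := by
          rw [walkA_fuel graph hg (p.toNat + 1) p hp0 (by omega) (by omega) graph.length (by omega),
              walkA_fuel graph hg (p.toNat + 1) p hp0 (by omega) (by omega) (graph.length + 1) (by omega)]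
        rw [chainOf, walkA, pyGet?_of_bounds graph cur h0 h1]
        simp only [← hpdef, if_neg hne, hfuel]
        have hfold : cur :: p :: walkA graph p (graph.length + 1) = cur :: chainOf graph p := rfl
        rw [hfold, ← hrec]
        cases memo.get? (walkB graph memo p f').2 with
        | none => simp
        | some c => simp

-- the outer loops agree, given the memo invariant
lemma loop_eq (f_ordering graph : List Int)
    (h1 : ∀ v ∈ f_ordering.drop 1, 0 ≤ v ∧ v < (graph.length : Int))
    (hg : GoodGraph graph) :
    ∀ (xs : List Int), (∀ x ∈ xs, 0 ≤ x ∧ x + 1 < (f_ordering.length : Int)) →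
      ∀ (memo : PySem.Dict Int (List Int)) (acc : List (List Int)), MemoInv graph memo →
      (xs.foldl
        (fun (st : PySem.Dict Int (List Int) × List (List Int)) x =>
          match PySem.List.pyGet? f_ordering (x + 1) with
          | none => st
          | some node =>
            let r := walkB graph st.1 node (graph.length + 1)
            let chain := match st.1.get? r.2 with
              | some c => r.1 ++ c
              | none => r.1 ++ [r.2]
            (st.1.insert node chain, st.2 ++ [chain]))
        (memo, acc)).2 =
      xs.foldl
        (fun ancestors x =>
          match PySem.List.pyGet? f_ordering (x + 1) with
          | none => ancestors
          | some child => ancestors ++ [child :: walkA graph child (graph.length + 1)]) acc := by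
  intro xs
  induction xs with
  | nil => intro _ memo acc _; rfl
  | cons x t ih =>
    intro hxs memo acc hm
    obtain ⟨hx0, hx1⟩ := hxs x (List.mem_cons_self ..)
    have hsome : PySem.List.pyGet? f_ordering (x + 1) =
        some (f_ordering[(x + 1).toNat]'(by omega)) :=
      pyGet?_of_bounds f_ordering (x + 1) (by omega) hx1
    set node := f_ordering[(x + 1).toNat]'(by omega) with hnode
    have hmem : node ∈ f_ordering.drop 1 := by
      have hidx : (x + 1).toNat - 1 < (f_ordering.drop 1).length := by
        simp; omega
      have : (f_ordering.drop 1)[(x + 1).toNat - 1]'hidx = node := by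
        rw [hnode, List.getElem_drop]
        congr 1; omega
      rw [← this]; exact List.getElem_mem _
    obtain ⟨hn0, hn1⟩ := h1 node hmem
    have hchain :
        (match memo.get? (walkB graph memo node (graph.length + 1)).2 with
         | some c => (walkB graph memo node (graph.length + 1)).1 ++ c
         | none => (walkB graph memo node (graph.length + 1)).1 ++
             [(walkB graph memo node (graph.length + 1)).2]) = chainOf graph node :=
      walkB_combine graph hg memo hm (node.toNat + 1) node hn0 hn1 (by omega)
        (graph.length + 1) (by omega)
    have hinv : MemoInv graph (memo.insert node (chainOf graph node)) := by
      intro k v hkv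
      rw [PySem.Dict.get?_insert] at hkv
      split_ifs at hkv with hk
      · cases hkv
        exact ⟨hk ▸ hn0, hk ▸ hn1, by rw [hk]⟩
      · exact hm k v hkv
    have ht : ∀ y ∈ t, 0 ≤ y ∧ y + 1 < (f_ordering.length : Int) :=
      fun y hy => hxs y (List.mem_cons_of_mem _ hy)
    simp only [List.foldl_cons, hsome, hchain]
    rw [ih ht (memo.insert node (chainOf graph node)) (acc ++ [chainOf graph node]) hinv]
    simp only [chainOf]

-- ===== VERDICT (by name: the statement is the Claim_ definition above) =====
theorem find_ancestors_spec : Claim_equal_find_ancestors := by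
  intro f_ordering graph _ hpre
  unfold Spec_find_ancestors find_ancestors find_ancestors_alt
  by_cases hlen : 2 ≤ f_ordering.length
  · obtain ⟨h1, hg⟩ := hpre hlen
    rw [loop_eq f_ordering graph h1 hg _ ?_ PySem.Dict.empty [] (memoInv_empty graph)]
    intro x hx
    rw [PySem.List.mem_pyRange_one] at hx
    omega
  · rw [PySem.List.pyRange_one_eq_nil (by push_cast; omega)]
    rfl
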